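-- pv_equiv track=rewrite | github.com/Glebhl/LexiForge | pipeline/task_generation_parsers.py | tokenize_for_word_bank
-- ===== SOURCE A (Python) =====
-- def tokenize_for_word_bank(text: str) -> list[str]:
--     """
--     Splits a string into words for the word bank.
--
--     Rules:
--     - preserves letters of any alphabet
--     - allows any non-whitespace characters inside words
--     - removes non-letter characters at word boundaries
--     - does not normalize case
--     """
--     tokens = []
--
--     for chunk in text.split():
--         start = 0
--         end = len(chunk)
--
--         while start < end and not chunk[start].isalpha():
--             start += 1
--
--         while end > start and not chunk[end - 1].isalpha():
--             end -= 1
--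
--         if start < end:
--             tokens.append(chunk[start:end])
--
--     return tokens
-- ===== SOURCE B (Python) =====
-- def _core(chunk):
--     first = last = -1
--     for i, c in enumerate(chunk):
--         if c.isalpha():
--             last = i
--             if first < 0:
--                 first = i
--     return chunk[first:last + 1] if first >= 0 else None
--
--
-- def tokenize_for_word_bank(text):
--     return [w for w in map(_core, text.split()) if w is not None]
-- ===== Notes on version B (the rewrite author's own statement) =====
-- stated objective: alternative
-- what changed: Per whitespace-split chunk, B replaces A's two boundary-trimming while-loops (advance start, retreat end) by one forward enumerate pass that records the first and last alphabetic index and takes a single inclusive slice, assembled with map/filter instead of an accumulator loop.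
import Mathlib
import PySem

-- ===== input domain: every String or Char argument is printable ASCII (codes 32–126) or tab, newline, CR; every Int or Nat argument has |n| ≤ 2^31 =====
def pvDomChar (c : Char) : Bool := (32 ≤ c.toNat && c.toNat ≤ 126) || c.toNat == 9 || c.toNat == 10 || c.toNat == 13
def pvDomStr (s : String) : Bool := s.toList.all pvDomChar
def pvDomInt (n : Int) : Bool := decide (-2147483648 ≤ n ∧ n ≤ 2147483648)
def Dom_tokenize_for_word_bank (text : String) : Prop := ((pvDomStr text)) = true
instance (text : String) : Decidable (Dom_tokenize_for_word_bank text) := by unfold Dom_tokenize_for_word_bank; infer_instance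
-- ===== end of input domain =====

-- B replaces A's two boundary-trimming while-loops per chunk by a single enumerate pass that
-- records the first and last alphabetic index and takes one inclusive slice (objective: alternative).

-- ===== PORT A =====
-- while start < end and not chunk[start].isalpha(): start += 1
-- (chunk[start] is read with getD; the loop guard keeps start in range, so the default is never used)
def pvAdvStart (cs : List Char) (s e : Nat) : Nat :=
  if s < e then
    if !PySem.Chars.isalpha (cs.getD s ' ') then pvAdvStart cs (s + 1) e else s
  else s
termination_by e - s

-- while end > start and not chunk[end - 1].isalpha(): end -= 1
def pvRetEnd (cs : List Char) (s e : Nat) : Nat :=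
  if s < e then
    if !PySem.Chars.isalpha (cs.getD (e - 1) ' ') then pvRetEnd cs s (e - 1) else e
  else e

-- chunk[start:end] is a Python slice on code points: PySem.List.slice on chunk.toList
def tokenize_for_word_bank (text : String) : List String :=
  (PySem.Str.split₀ text).foldl (fun tokens chunk =>
    let cs := chunk.toList
    let start := pvAdvStart cs 0 cs.length
    let e := pvRetEnd cs start cs.length
    if start < e then
      tokens ++ [String.ofList (PySem.List.slice cs (some (start : Int)) (some (e : Int)))]
    else tokens) []

-- ===== PORT B =====
def pvCore (chunk : String) : Option String :=
  let cs := chunk.toList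
  let fl := (PySem.List.enumerate cs 0).foldl
    (fun (fl : Int × Int) ic =>
      if PySem.Chars.isalpha ic.2 then (if fl.1 < 0 then ic.1 else fl.1, ic.1) else fl)
    (-1, -1)
  if 0 ≤ fl.1 then
    some (String.ofList (PySem.List.slice cs (some fl.1) (some (fl.2 + 1))))
  else none

def tokenize_for_word_bank_alt (text : String) : List String :=
  ((PySem.Str.split₀ text).map pvCore).filterMap id

-- ===== PRECONDITION & SPEC =====
def Spec_tokenize_for_word_bank (text : String) (out : List String) : Prop := out = tokenize_for_word_bank_alt text
instance (text : String) (out : List String) : Decidable (Spec_tokenize_for_word_bank text out) := by unfold Spec_tokenize_for_word_bank; infer_instance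

-- ===== CLAIM (what is proved, stated in full; the proofs are below) =====
def Claim_equal_tokenize_for_word_bank : Prop := ∀ (text : String), Dom_tokenize_for_word_bank text → Spec_tokenize_for_word_bank text (tokenize_for_word_bank text)

-- ===== LEMMAS AND PROOFS =====

-- first alphabetic index of a chunk, if any
def pvFirst? : List Char → Option Nat
  | [] => none
  | c :: cs => if PySem.Chars.isalpha c then some 0 else (pvFirst? cs).map (· + 1)

-- last alphabetic index of a chunk, if any
def pvLast? : List Char → Option Nat
  | [] => none
  | c :: cs =>
    match pvLast? cs with
    | some j => some (j + 1)
    | none => if PySem.Chars.isalpha c then some 0 else none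

theorem pvFirst?_none_iff (cs : List Char) : pvFirst? cs = none ↔ pvLast? cs = none := by
  induction cs with
  | nil => simp [pvFirst?, pvLast?]
  | cons c cs ih =>
    simp only [pvFirst?, pvLast?]
    cases h : pvLast? cs with
    | some j =>
      have : ¬ pvFirst? cs = none := by rw [ih, h]; simp
      cases hf : pvFirst? cs with
      | some i => by_cases ha : PySem.Chars.isalpha c <;> simp [ha]
      | none => exact absurd hf this
    | none =>
      have hf : pvFirst? cs = none := ih.mpr h
      simp [hf]

theorem pvAdvStart_eq (cs : List Char) : ∀ (k s : Nat), cs.length - s = k → s ≤ cs.length →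
    pvAdvStart cs s cs.length =
      (match pvFirst? (cs.drop s) with | some i => s + i | none => cs.length) := by
  intro k
  induction k with
  | zero =>
    intro s hk hs
    have hse : s = cs.length := by omega
    rw [pvAdvStart]
    simp [hse, pvFirst?]
  | succ k ih =>
    intro s hk hs
    have hlt : s < cs.length := by omega
    have hget : cs.getD s ' ' = cs[s] := by simp [List.getD, hlt]
    have hdrop : cs.drop s = cs[s] :: cs.drop (s + 1) := (List.getElem_cons_drop hlt).symm
    rw [pvAdvStart, if_pos hlt, hget]
    by_cases ha : PySem.Chars.isalpha cs[s]
    · rw [hdrop]; simp only [pvFirst?, ha, if_pos, Bool.not_true, Bool.false_eq_true, if_false]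
      exact (Nat.add_zero s).symm
    · simp only [ha, Bool.not_false, if_true, hdrop, pvFirst?, Bool.false_eq_true, if_false]
      rw [ih (s + 1) (by omega) (by omega)]
      cases hf' : pvFirst? (cs.drop (s + 1)) <;> simp
      ac_rfl

theorem pvLast?_append (l : List Char) (c : Char) :
    pvLast? (l ++ [c]) = if PySem.Chars.isalpha c then some l.length else pvLast? l := by
  induction l with
  | nil => by_cases ha : PySem.Chars.isalpha c <;> simp [pvLast?, ha]
  | cons a l ih =>
    simp only [List.cons_append, pvLast?, ih]
    by_cases ha : PySem.Chars.isalpha c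
    · simp [ha]
    · cases h : pvLast? l <;> simp [ha]

theorem pvRetEnd_eq (cs : List Char) (s : Nat) : ∀ (e : Nat), s ≤ e → e ≤ cs.length →
    pvRetEnd cs s e =
      (match pvLast? ((cs.drop s).take (e - s)) with | some j => s + j + 1 | none => s) := by
  intro e
  induction e with
  | zero =>
    intro hs _
    have h0 : s = 0 := by omega
    subst h0
    rw [pvRetEnd]
    simp [pvLast?]
  | succ e ih =>
    intro hs he
    rw [pvRetEnd]
    by_cases hse : s < e + 1
    · have hel : e < cs.length := by omega
      have hget : cs.getD (e + 1 - 1) ' ' = cs[e] := by simp [List.getD, hel]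
      have htake : (cs.drop s).take (e + 1 - s) = (cs.drop s).take (e - s) ++ [cs[e]] := by
        have h1 : e + 1 - s = (e - s) + 1 := by omega
        have h2 : (cs.drop s)[e - s]? = some cs[e] := by
          rw [List.getElem?_drop]
          have : s + (e - s) = e := by omega
          rw [this, List.getElem?_eq_getElem hel]
        rw [h1, List.take_add_one, h2]
        rfl
      rw [if_pos hse, hget, htake, pvLast?_append]
      by_cases ha : PySem.Chars.isalpha cs[e]
      · have hlen : ((cs.drop s).take (e - s)).length = e - s := by
          simp [List.length_take, List.length_drop]; omega
        simp [ha, hlen]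
        omega
      · simp only [ha, Bool.not_false, if_true, Bool.false_eq_true, if_false]
        exact ih (by omega) (by omega)
    · have hse' : s = e + 1 := by omega
      rw [if_neg hse]
      simp [hse', pvLast?]

theorem pvFirst?_lt_length (cs : List Char) (i : Nat) (h : pvFirst? cs = some i) : i < cs.length := by
  induction cs generalizing i with
  | nil => simp [pvFirst?] at h
  | cons c cs ih =>
    by_cases ha : PySem.Chars.isalpha c
    · simp [pvFirst?, ha] at h; simp [← h]
    · simp only [pvFirst?, ha, Bool.false_eq_true, if_false, Option.map_eq_some_iff] at h
      obtain ⟨i', hi', rfl⟩ := h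
      have := ih i' hi'
      simp; omega

theorem pvFirst?_le_pvLast? (cs : List Char) (i j : Nat)
    (hf : pvFirst? cs = some i) (hl : pvLast? cs = some j) : i ≤ j := by
  induction cs generalizing i j with
  | nil => simp [pvFirst?] at hf
  | cons c cs ih =>
    by_cases ha : PySem.Chars.isalpha c
    · simp [pvFirst?, ha] at hf; omega
    · simp only [pvFirst?, ha, Bool.false_eq_true, if_false, Option.map_eq_some_iff] at hf
      obtain ⟨i', hi', rfl⟩ := hf
      have hne : pvLast? cs ≠ none := by
        intro hn
        rw [(pvFirst?_none_iff cs).mpr hn] at hi'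
        cases hi'
      cases hl' : pvLast? cs with
      | none => exact absurd hl' hne
      | some j' =>
        simp only [pvLast?, hl', Option.some.injEq] at hl
        have := ih i' j' hi' hl'
        omega

theorem pvLast?_drop (cs : List Char) : ∀ (i j : Nat), pvLast? cs = some j → i ≤ j →
    pvLast? (cs.drop i) = some (j - i) := by
  induction cs with
  | nil => intro i j h _; simp [pvLast?] at h
  | cons c cs ih =>
    intro i j h hij
    cases i with
    | zero => simpa using h
    | succ i =>
      cases hl' : pvLast? cs with
      | none =>
        simp only [pvLast?, hl'] at h
        by_cases ha : PySem.Chars.isalpha c <;> simp [ha] at h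
        omega
      | some j' =>
        simp only [pvLast?, hl', Option.some.injEq] at h
        have hj : j = j' + 1 := by omega
        subst hj
        simp only [List.drop_succ_cons]
        have := ih i j' hl' (by omega)
        rw [this]
        congr 1
        omega

theorem pvScan_set (cs : List Char) : ∀ (k f l : Int), 0 ≤ f →
    (PySem.List.enumerate cs k).foldl
      (fun (fl : Int × Int) ic =>
        if PySem.Chars.isalpha ic.2 then (if fl.1 < 0 then ic.1 else fl.1, ic.1) else fl)
      (f, l)
    = (f, match pvLast? cs with | some j => k + (j : Int) | none => l) := by
  induction cs with
  | nil => intro k f l _; simp [PySem.List.enumerate_nil, pvLast?]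
  | cons c cs ih =>
    intro k f l hf
    rw [PySem.List.enumerate_cons, List.foldl_cons]
    by_cases ha : PySem.Chars.isalpha c
    · simp only [ha, if_true, if_neg (not_lt.mpr hf)]
      rw [ih (k + 1) f k hf]
      cases hl : pvLast? cs with
      | some j => simp only [pvLast?, hl]; congr 1; push_cast; ring
      | none => simp [pvLast?, hl, ha]
    · simp only [ha, Bool.false_eq_true, if_false]
      rw [ih (k + 1) f l hf]
      cases hl : pvLast? cs with
      | some j => simp only [pvLast?, hl]; congr 1; push_cast; ring
      | none => simp [pvLast?, hl, ha]

theorem pvScan_neg (cs : List Char) : ∀ (k l : Int), 0 ≤ k →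
    (PySem.List.enumerate cs k).foldl
      (fun (fl : Int × Int) ic =>
        if PySem.Chars.isalpha ic.2 then (if fl.1 < 0 then ic.1 else fl.1, ic.1) else fl)
      (-1, l)
    = (match pvFirst? cs with
       | none => ((-1 : Int), l)
       | some i => (k + (i : Int), k + (((pvLast? cs).getD 0 : Nat) : Int))) := by
  induction cs with
  | nil => intro k l _; simp [PySem.List.enumerate_nil, pvFirst?]
  | cons c cs ih =>
    intro k l hk
    rw [PySem.List.enumerate_cons, List.foldl_cons]
    by_cases ha : PySem.Chars.isalpha c
    · simp only [ha, if_true, if_pos (by norm_num : (-1 : Int) < 0)]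
      rw [pvScan_set cs (k + 1) k k hk]
      simp only [pvFirst?, ha, if_true]
      cases hl : pvLast? cs with
      | some j => simp only [pvLast?, hl, Option.getD_some]; congr 1 <;> push_cast <;> ring
      | none => simp [pvLast?, hl, ha]
    · simp only [ha, Bool.false_eq_true, if_false]
      rw [ih (k + 1) l (by omega)]
      cases hfst : pvFirst? cs with
      | none => simp [pvFirst?, ha, hfst]
      | some i =>
        have hne : pvLast? cs ≠ none := by
          intro hn
          rw [(pvFirst?_none_iff cs).mpr hn] at hfst
          cases hfst
        cases hl : pvLast? cs with
        | none => exact absurd hl hne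
        | some j =>
          simp only [pvFirst?, ha, Bool.false_eq_true, if_false, hfst, Option.map_some,
            pvLast?, hl, Option.getD_some]
          congr 1 <;> push_cast <;> ring

theorem pvChunk_eq (chunk : String) :
    (if pvAdvStart chunk.toList 0 chunk.toList.length <
        pvRetEnd chunk.toList (pvAdvStart chunk.toList 0 chunk.toList.length) chunk.toList.length then
      some (String.ofList (PySem.List.slice chunk.toList
        (some ((pvAdvStart chunk.toList 0 chunk.toList.length : Nat) : Int))
        (some ((pvRetEnd chunk.toList (pvAdvStart chunk.toList 0 chunk.toList.length)
          chunk.toList.length : Nat) : Int))))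
    else none) = pvCore chunk := by
  simp only [pvCore]
  rw [pvScan_neg chunk.toList 0 (-1) (by norm_num)]
  have hadv := pvAdvStart_eq chunk.toList (chunk.toList.length - 0) 0 rfl (Nat.zero_le _)
  rw [List.drop_zero] at hadv
  cases hf : pvFirst? chunk.toList with
  | none =>
    rw [hf] at hadv
    simp only [hadv]
    have hret := pvRetEnd_eq chunk.toList chunk.toList.length chunk.toList.length le_rfl le_rfl
    simp only [Nat.sub_self, List.take_zero, pvLast?] at hret
    rw [hret]
    norm_num
  | some i =>
    rw [hf] at hadv
    simp only [hadv]
    have hilen : i < chunk.toList.length := pvFirst?_lt_length _ _ hf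
    have hne : pvLast? chunk.toList ≠ none := by
      intro hn
      rw [(pvFirst?_none_iff chunk.toList).mpr hn] at hf
      cases hf
    cases hl : pvLast? chunk.toList with
    | none => exact absurd hl hne
    | some j =>
      have hij : i ≤ j := pvFirst?_le_pvLast? _ _ _ hf hl
      have hret := pvRetEnd_eq chunk.toList i chunk.toList.length (by omega) le_rfl
      have hfull : (chunk.toList.drop i).take (chunk.toList.length - i) = chunk.toList.drop i := by
        rw [← List.length_drop]
        exact List.take_length
      rw [hfull, pvLast?_drop chunk.toList i j hl hij] at hret
      have hret2 : pvRetEnd chunk.toList i chunk.toList.length = j + 1 := by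
        rw [hret]
        show i + (j - i) + 1 = j + 1
        omega
      simp only [zero_add]
      rw [hret2, if_pos (show i < j + 1 by omega),
        if_pos (show (0 : Int) ≤ (i : Int) by positivity)]
      congr 2

theorem pvFold_eq (chunks : List String) : ∀ acc : List String,
    chunks.foldl (fun tokens chunk =>
      let cs := chunk.toList
      let start := pvAdvStart cs 0 cs.length
      let e := pvRetEnd cs start cs.length
      if start < e then
        tokens ++ [String.ofList (PySem.List.slice cs (some (start : Int)) (some (e : Int)))]
      else tokens) acc
    = acc ++ (chunks.map pvCore).filterMap id := by
  induction chunks with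
  | nil => intro acc; simp
  | cons ch chs ih =>
    intro acc
    rw [List.foldl_cons, List.map_cons, List.filterMap_cons]
    have h := pvChunk_eq ch
    cases hc : pvCore ch with
    | none =>
      rw [hc] at h
      split at h
      · cases h
      · rename_i hcond
        simp only [hcond, if_false]
        rw [ih acc]
        simp
    | some w =>
      rw [hc] at h
      split at h
      · rename_i hcond
        simp only [hcond, if_true]
        rw [ih]
        simp only [Option.some.injEq] at h
        subst h
        simp [List.append_assoc]
      · cases h

-- ===== VERDICT (by name: the statement is the Claim_ definition above) =====
theorem tokenize_for_word_bank_spec : Claim_equal_tokenize_for_word_bank := by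
  intro text _
  unfold Spec_tokenize_for_word_bank tokenize_for_word_bank tokenize_for_word_bank_alt
  rw [pvFold_eq]
  simp
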